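-- pv_equiv track=rewrite | github.com/shenlong2010-unregular/probs | TwoToOne.py | longest2
-- ===== SOURCE A (Python) =====
-- def longest2(s1, s2):
--     # your code
--
--     # Defining the Alphabet
--     alphabet = "abcdefghijklmnopqrstuvwxyz"
--
--     # Concatenating the Two Given Strings
--     s = s1 + s2
--
--     # Declaring the Output Variable
--     y = ""
--
--     # Comparing whether a letter is in the string
--     for x in alphabet:
--       if x not in s:
--         continue
--       if x in s:
--         y = y + x
--
--     # returning the final output
--     return y
-- ===== SOURCE B (Python) =====
-- def longest2(s1, s2):
--     return ''.join(sorted(set(s1 + s2) & set("abcdefghijklmnopqrstuvwxyz")))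
-- ===== Notes on version B (the rewrite author's own statement) =====
-- stated objective: idiomatic
-- what changed: Replaces A's 26-step alphabet loop with repeated substring-membership tests by building the set of characters of s1+s2 once, intersecting it with the lowercase-letter set, and sorting the (small) intersection.
import Mathlib
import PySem

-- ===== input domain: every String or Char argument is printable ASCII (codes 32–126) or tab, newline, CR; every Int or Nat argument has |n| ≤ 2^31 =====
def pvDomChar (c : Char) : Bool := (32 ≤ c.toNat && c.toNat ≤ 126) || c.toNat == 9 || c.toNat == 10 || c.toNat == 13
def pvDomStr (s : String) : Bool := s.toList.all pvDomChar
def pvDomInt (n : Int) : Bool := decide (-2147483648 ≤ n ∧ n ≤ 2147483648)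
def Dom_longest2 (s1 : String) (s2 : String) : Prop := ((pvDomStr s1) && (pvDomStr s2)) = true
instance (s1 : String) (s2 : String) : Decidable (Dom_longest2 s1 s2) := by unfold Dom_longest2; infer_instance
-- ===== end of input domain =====

-- B replaces A's 26-iteration alphabet-membership loop by building the set of present
-- characters, intersecting it with the lowercase letters, and sorting (objective: idiomatic).

-- ===== PORT A =====
def longest2 (s1 : String) (s2 : String) : String :=
  -- alphabet = "abcdefghijklmnopqrstuvwxyz"
  let alphabet : List Char := "abcdefghijklmnopqrstuvwxyz".toList
  -- s = s1 + s2
  let s : List Char := s1.toList ++ s2.toList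
  -- y = ""; for x in alphabet: if x not in s: continue; if x in s: y = y + x
  let y : List Char := alphabet.foldl (fun y x =>
    if PySem.Chars.isIn [x] s = false then y
    else if PySem.Chars.isIn [x] s then y ++ [x] else y) []
  String.ofList y

-- ===== PORT B =====
def longest2_alt (s1 : String) (s2 : String) : String :=
  -- set(s1 + s2)
  let present : PySem.Set Char := PySem.Set.ofList (s1.toList ++ s2.toList)
  -- … & set("abcdefghijklmnopqrstuvwxyz")
  let letters : PySem.Set Char := PySem.Set.ofList "abcdefghijklmnopqrstuvwxyz".toList
  -- sorted(…)
  let picked : List Char := PySem.List.sorted (PySem.Set.inter present letters) (fun c => c) false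
  -- ''.join(…)
  String.ofList (PySem.Chars.join [] (picked.map (fun c => [c])))

-- ===== PRECONDITION & SPEC =====
def Spec_longest2 (s1 : String) (s2 : String) (out : String) : Prop := out = longest2_alt s1 s2
instance (s1 : String) (s2 : String) (out : String) : Decidable (Spec_longest2 s1 s2 out) := by unfold Spec_longest2; infer_instance

-- ===== CLAIM (what is proved, stated in full; the proofs are below) =====
def Claim_equal_longest2 : Prop := ∀ (s1 : String) (s2 : String), Dom_longest2 s1 s2 → Spec_longest2 s1 s2 (longest2 s1 s2)

-- ===== LEMMAS AND PROOFS =====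

-- A's loop body, with its redundant 'continue' test, is a plain conditional append.
theorem longest2_foldl_eq_filter (s : List Char) (l : List Char) :
    l.foldl (fun y x => if PySem.Chars.isIn [x] s = false then y
      else if PySem.Chars.isIn [x] s then y ++ [x] else y) [] =
      l.filter (fun x => PySem.Chars.isIn [x] s) := by
  have hbody : (fun (y : List Char) x => if PySem.Chars.isIn [x] s = false then y
      else if PySem.Chars.isIn [x] s then y ++ [x] else y) =
      (fun y x => if PySem.Chars.isIn [x] s then y ++ [x] else y) := by
    funext y x
    cases PySem.Chars.isIn [x] s <;> simp
  rw [hbody]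
  simpa using PySem.List.foldl_append_if_eq_filter (fun x => PySem.Chars.isIn [x] s) l []

-- B's sorted intersection is exactly the alphabet filtered by presence in s.
theorem longest2_sorted_eq_filter (s : List Char) :
    PySem.List.sorted
      (PySem.Set.inter (PySem.Set.ofList s)
        (PySem.Set.ofList "abcdefghijklmnopqrstuvwxyz".toList)) (fun c => c) false =
      "abcdefghijklmnopqrstuvwxyz".toList.filter (fun x => PySem.Chars.isIn [x] s) := by
  apply PySem.List.sorted_eq_of_perm_of_pairwise_lt
  · rw [List.perm_ext_iff_of_nodup
      (List.Nodup.filter _ (by decide))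
      (PySem.Set.nodup_inter _ _ (PySem.Set.nodup_ofList _))]
    intro a
    simp [PySem.Set.mem_inter, PySem.Set.mem_ofList, PySem.Chars.isIn_iff_infix,
      List.singleton_infix_iff, And.comm]
  · exact List.Pairwise.filter _ (by decide)

theorem longest2_eq_alt (s1 s2 : String) : longest2 s1 s2 = longest2_alt s1 s2 := by
  simp only [longest2, longest2_alt]
  rw [PySem.Chars.join_nil_singletons, longest2_foldl_eq_filter,
    longest2_sorted_eq_filter]

-- ===== VERDICT (by name: the statement is the Claim_ definition above) =====
theorem longest2_spec : Claim_equal_longest2 := by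
  intro s1 s2 _
  unfold Spec_longest2
  exact longest2_eq_alt s1 s2
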